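-- pv_equiv track=rewrite | github.com/jhamrick/dodona | parsetree/helper.py | find_partial_key
-- ===== SOURCE A (Python) =====
-- def tokenize(mess):
--     words = []
--     #print mess
--     oldchars = ""
--     for char in mess:
--         #print char
--         if char == "," or \
--            char == "." or \
--            char == "?" or \
--            char == "!" or \
--            char == "\'" or \
--            char == "\"":
--             if not oldchars == "":
--                 words.append(oldchars)
--                 oldchars = ""
--             words.append(char)
--         elif char == " " and not oldchars == "":
--             words.append(oldchars)
--             oldchars = ""
--         elif char == " " and oldchars == "":
--             pass
--         else:
--             oldchars += char
--     if oldchars != "":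
--         words.append(oldchars)
--     #print words
--     return words
--
-- def find_partial_key(word, list):
--     keys = []
--     for key in list.keys():
--         key2 = tokenize(key)
--         for k in key2:
--             if k == word:
--                 keys.append(key)
--                 break
--     return keys
-- ===== SOURCE B (Python) =====
-- import re
--
-- _TOKEN_RE = re.compile(r"[,.?!'\"]|[^,.?!'\" ]+")
--
-- def tokenize(mess):
--     # one regex pass: each punctuation char is its own token,
--     # maximal runs of other non-space chars are tokens, spaces separate
--     return _TOKEN_RE.findall(mess)
--
-- def find_partial_key(word, list):
--     return [key for key in list.keys() if word in tokenize(key)]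
-- ===== Notes on version B (the rewrite author's own statement) =====
-- stated objective: idiomatic
-- what changed: tokenize is rewritten as a single regex findall pass (punctuation char or maximal non-punctuation/non-space run) instead of the character-by-character accumulator loop, and find_partial_key becomes a comprehension filtering on membership instead of nested loops with break.
import Mathlib
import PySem

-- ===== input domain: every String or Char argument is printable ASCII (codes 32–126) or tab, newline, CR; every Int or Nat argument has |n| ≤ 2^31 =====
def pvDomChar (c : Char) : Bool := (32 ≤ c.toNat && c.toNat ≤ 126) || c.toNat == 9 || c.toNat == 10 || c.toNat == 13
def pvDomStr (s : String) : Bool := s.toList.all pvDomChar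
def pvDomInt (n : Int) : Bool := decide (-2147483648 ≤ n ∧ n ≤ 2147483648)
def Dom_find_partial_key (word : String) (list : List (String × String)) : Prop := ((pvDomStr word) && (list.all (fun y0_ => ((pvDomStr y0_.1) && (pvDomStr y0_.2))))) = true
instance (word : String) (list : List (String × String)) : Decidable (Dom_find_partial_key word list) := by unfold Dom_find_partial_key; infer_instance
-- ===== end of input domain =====

-- B rewrites tokenize as a single maximal-run scan (the regex findall pass) and
-- find_partial_key as a filter on token membership, instead of A's char-by-char
-- accumulator loop and nested loops with break.  Objective: idiomatic.

-- ===== PORT A =====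
-- the six punctuation characters tested by A's if-chain
def pvPunct (c : Char) : Bool :=
  c == ',' || c == '.' || c == '?' || c == '!' || c == '\'' || c == '"'

-- the for-loop of tokenize: state = (words so far, oldchars)
def pvTokLoop : List Char → List String → List Char → List String
  | [], words, old => if old.isEmpty then words else words ++ [String.mk old]
  | c :: cs, words, old =>
    if pvPunct c then
      pvTokLoop cs ((if old.isEmpty then words else words ++ [String.mk old]) ++ [String.mk [c]]) []
    else if c == ' ' then
      if old.isEmpty then pvTokLoop cs words []
      else pvTokLoop cs (words ++ [String.mk old]) []
    else
      pvTokLoop cs words (old ++ [c])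

def pvTokenize (mess : String) : List String := pvTokLoop mess.toList [] []

-- the inner 'for k in key2: if k == word: … break' loop
def pvInner (key2 : List String) (word : String) : Bool :=
  match key2 with
  | [] => false
  | k :: ks => if k == word then true else pvInner ks word

def find_partial_key (word : String) (list : List (String × String)) : List String :=
  ((PySem.Dict.ofList list).keys).foldl
    (fun keys key => if pvInner (pvTokenize key) word then keys ++ [key] else keys) []

-- ===== PORT B =====
-- a char that the regex class [^,.?!'" ] rejects
def pvSep (c : Char) : Bool := pvPunct c || c == ' '

-- re.findall(r"[,.?!'\"]|[^,.?!'\" ] +", mess) ported by hand as the maximal-run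
-- scanner the regex performs (exact: each punct char is a token, maximal runs of
-- non-separator chars are tokens, spaces are skipped)
def pvTokensB : List Char → List String
  | [] => []
  | c :: cs =>
    if pvPunct c then String.mk [c] :: pvTokensB cs
    else if c == ' ' then pvTokensB cs
    else
      String.mk (c :: cs.takeWhile (fun d => !pvSep d)) ::
        pvTokensB (cs.dropWhile (fun d => !pvSep d))
  termination_by cs => cs.length
  decreasing_by
    all_goals first
      | exact Nat.lt_succ_of_le (List.length_dropWhile_le _ _)
      | simp

def pvTokenizeB (mess : String) : List String := pvTokensB mess.toList

def find_partial_key_alt (word : String) (list : List (String × String)) : List String :=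
  ((PySem.Dict.ofList list).keys).filter (fun key => (pvTokenizeB key).contains word)

-- ===== PRECONDITION & SPEC =====
def Spec_find_partial_key (word : String) (list : List (String × String)) (out : List String) : Prop := out = find_partial_key_alt word list
instance (word : String) (list : List (String × String)) (out : List String) : Decidable (Spec_find_partial_key word list out) := by unfold Spec_find_partial_key; infer_instance

-- ===== CLAIM (what is proved, stated in full; the proofs are below) =====
def Claim_equal_find_partial_key : Prop := ∀ (word : String) (list : List (String × String)), Dom_find_partial_key word list → Spec_find_partial_key word list (find_partial_key word list)

-- ===== LEMMAS AND PROOFS =====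

theorem pvInner_eq_contains (ks : List String) (w : String) :
    pvInner ks w = ks.contains w := by
  induction ks with
  | nil => rfl
  | cons k ks ih =>
    by_cases h : k == w
    · simp [pvInner, h]
      exact Or.inl (beq_iff_eq.mp h).symm
    · simp [pvInner, h, ih]
      intro e
      exact absurd (by simp [e] : (k == w) = true) h

-- A's accumulator loop equals the run scanner: a pending nonempty oldchars merges
-- with the leading run of the remaining characters.
theorem pvTokLoop_eq (cs : List Char) : ∀ (ws : List String) (old : List Char),
    pvTokLoop cs ws old =
      ws ++ (if old.isEmpty then pvTokensB cs
             else String.mk (old ++ cs.takeWhile (fun d => !pvSep d)) ::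
                  pvTokensB (cs.dropWhile (fun d => !pvSep d))) := by
  induction cs with
  | nil =>
    intro ws old
    cases old <;> simp [pvTokLoop, pvTokensB]
  | cons c cs ih =>
    intro ws old
    by_cases hp : pvPunct c
    · have hs : pvSep c = true := by simp [pvSep, hp]
      cases old with
      | nil =>
        simp [pvTokLoop, hp, ih, pvTokensB]
      | cons o os =>
        simp [pvTokLoop, hp, ih, pvTokensB, hs]
    · by_cases hsp : c == ' '
      · have hs : pvSep c = true := by simp [pvSep, hsp]
        cases old with
        | nil =>
          simp [pvTokLoop, hp, hsp, ih, pvTokensB]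
        | cons o os =>
          simp [pvTokLoop, hp, hsp, ih, pvTokensB, hs]
      · have hs : pvSep c = false := by simp [pvSep, hp, hsp]
        cases old with
        | nil =>
          simp [pvTokLoop, hp, hsp, ih, pvTokensB, hs]
        | cons o os =>
          simp [pvTokLoop, hp, hsp, ih, hs, List.append_assoc]

theorem pvTokenize_eq (mess : String) : pvTokenize mess = pvTokenizeB mess := by
  simp [pvTokenize, pvTokenizeB, pvTokLoop_eq]

-- ===== VERDICT (by name: the statement is the Claim_ definition above) =====
theorem find_partial_key_spec : Claim_equal_find_partial_key := by
  intro word list _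
  unfold Spec_find_partial_key find_partial_key find_partial_key_alt
  rw [PySem.List.foldl_append_if_eq_filter
        (p := fun key => pvInner (pvTokenize key) word)]
  simp only [pvInner_eq_contains, pvTokenize_eq, List.nil_append]
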